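-- pv_equiv track=rewrite | github.com/csany2020c/MyGame | Algoritmusok/kollarbalint.py | hf4_1
-- ===== SOURCE A (Python) =====
-- from typing import List
--
-- def hf2_3(szam1: int) -> List['int']:
--     listaki: List['int'] = list()
--     while szam1 > 0:
--         listaki.append(szam1 % 10)
--         szam1 = szam1 // 10
--     return listaki
--
-- def hf4_1(szambe: int) -> bool:
--     a: int = 0
--     b: int = 0
--     c: int = 0
--     d: int = 0
--     e: int = 0
--     f: int = 0
--     g: int = 0
--     if szambe == 1:
--         return True
--     else:
--         for i in (hf2_3(szambe)):
--             a += i ** 2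
--     if a == 1:
--         return True
--     else:
--         for i in (hf2_3(a)):
--             b += i ** 2
--     if b == 1:
--         return True
--     else:
--         for i in (hf2_3(b)):
--             c += i ** 2
--     if c == 1:
--         return True
--     else:
--         for i in (hf2_3(c)):
--             d += i ** 2
--     if d == 1:
--         return True
--     else:
--         for i in (hf2_3(d)):
--             e += i ** 2
--     if e == 1:
--         return True
--     else:
--         for i in (hf2_3(e)):
--             f += i ** 2
--     if f == 1:
--         return True
--     else:
--         for i in (hf2_3(f)):
--             g += i ** 2
--     if g == 1:
--         return True
--     else:
--         return False
-- ===== SOURCE B (Python) =====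
-- def hf4_1(szambe: int) -> bool:
--     # Backward reachability: every digit-square-sum of a 32-bit int fits in 0..810,
--     # so precompute the set of values in that range reaching 1 within 6 steps,
--     # then answer with one membership test after a single transformation.
--     if szambe == 1:
--         return True
--
--     def f(n: int) -> int:
--         s = 0
--         while n > 0:
--             s += (n % 10) ** 2
--             n //= 10
--         return s
--
--     good = {1}
--     for _ in range(6):
--         good = {v for v in range(811) if f(v) in good}
--     return f(szambe) in good
-- ===== Notes on version B (the rewrite author's own statement) =====
-- stated objective: alternative
-- what changed: Replaces A's seven unrolled forward transform/check blocks by backward reachability: precompute the set of values in 0..810 (the range of one digit-square-sum step on 32-bit ints) that reach 1 within 6 steps, then answer with a single transformation and one membership test.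
import Mathlib
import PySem

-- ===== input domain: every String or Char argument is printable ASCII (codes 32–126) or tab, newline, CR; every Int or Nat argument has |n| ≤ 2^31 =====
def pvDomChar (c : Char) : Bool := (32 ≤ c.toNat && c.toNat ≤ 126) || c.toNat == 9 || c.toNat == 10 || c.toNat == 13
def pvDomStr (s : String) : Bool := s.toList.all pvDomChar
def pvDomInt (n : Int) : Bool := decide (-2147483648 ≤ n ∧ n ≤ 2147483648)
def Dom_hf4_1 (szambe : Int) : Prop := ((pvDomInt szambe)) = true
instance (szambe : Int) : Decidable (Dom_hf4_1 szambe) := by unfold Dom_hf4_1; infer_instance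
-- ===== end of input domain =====

-- B replaces A's seven unrolled forward transform/check blocks by backward reachability over the
-- finite state space 0..810 (the range of one digit-square-sum step on 32-bit ints), then one
-- transformation and one membership test (objective: alternative).

-- ===== PORT A =====
-- hf2_3: while szam1 > 0: append szam1 % 10; szam1 //= 10
def hf2_3 (szam1 : Int) : List Int :=
  if h : szam1 > 0 then
    PySem.Int.mod szam1 10 :: hf2_3 (PySem.Int.floordiv szam1 10)
  else []
termination_by szam1.toNat
decreasing_by
  rw [PySem.Int.floordiv_eq_ediv_of_pos (by omega)]
  omega

def hf4_1 (szambe : Int) : Bool :=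
  if szambe == 1 then true
  else
    let a := (hf2_3 szambe).foldl (fun acc i => acc + i ^ 2) 0
    if a == 1 then true
    else
      let b := (hf2_3 a).foldl (fun acc i => acc + i ^ 2) 0
      if b == 1 then true
      else
        let c := (hf2_3 b).foldl (fun acc i => acc + i ^ 2) 0
        if c == 1 then true
        else
          let d := (hf2_3 c).foldl (fun acc i => acc + i ^ 2) 0
          if d == 1 then true
          else
            let e := (hf2_3 d).foldl (fun acc i => acc + i ^ 2) 0
            if e == 1 then true
            else
              let f := (hf2_3 e).foldl (fun acc i => acc + i ^ 2) 0
              if f == 1 then true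
              else
                let g := (hf2_3 f).foldl (fun acc i => acc + i ^ 2) 0
                if g == 1 then true else false

-- ===== PORT B =====
-- Source B's inner helper f: s = 0; while n > 0: s += (n % 10) ** 2; n //= 10
def digitSqSum (n : Int) (s : Int) : Int :=
  if h : n > 0 then
    digitSqSum (PySem.Int.floordiv n 10) (s + (PySem.Int.mod n 10) ^ 2)
  else s
termination_by n.toNat
decreasing_by
  rw [PySem.Int.floordiv_eq_ediv_of_pos (by omega)]
  omega

-- Source B's 'good' set after k refinement rounds: {v for v in range(811) if f(v) in good}
-- (a filter of a range is duplicate-free, so the Python set is this list's elements)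
def bGood : Nat → List Int
  | 0 => [1]
  | k + 1 =>
    let g := bGood k
    (PySem.List.pyRange 0 811 1).filter (fun v => g.contains (digitSqSum v 0))

def hf4_1_alt (szambe : Int) : Bool :=
  if szambe == 1 then true
  else (bGood 6).contains (digitSqSum szambe 0)

-- ===== PRECONDITION & SPEC =====
def Spec_hf4_1 (szambe : Int) (out : Bool) : Prop := out = hf4_1_alt szambe
instance (szambe : Int) (out : Bool) : Decidable (Spec_hf4_1 szambe out) := by unfold Spec_hf4_1; infer_instance

-- ===== CLAIM (what is proved, stated in full; the proofs are below) =====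
def Claim_equal_hf4_1 : Prop := ∀ (szambe : Int), Dom_hf4_1 szambe → Spec_hf4_1 szambe (hf4_1 szambe)

-- ===== LEMMAS AND PROOFS =====

-- A's foldl over the digit list computes B's running digit-square sum
lemma foldl_hf2_3 (n a : Int) :
    (hf2_3 n).foldl (fun acc i => acc + i ^ 2) a = digitSqSum n a := by
  fun_induction digitSqSum n a with
  | case1 n s h ih => rw [hf2_3, dif_pos h, List.foldl_cons, ih]
  | case2 n s h => rw [hf2_3, dif_neg h, List.foldl_nil]

lemma digitSqSum_nonneg (n s : Int) (hs : 0 ≤ s) : 0 ≤ digitSqSum n s := by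
  fun_induction digitSqSum n s with
  | case1 n s h ih => exact ih (by positivity)
  | case2 n s h => exact hs

lemma digitSqSum_le (k : Nat) : ∀ n s : Int, n < 10 ^ k → digitSqSum n s ≤ s + 81 * k := by
  induction k with
  | zero =>
    intro n s hn
    rw [digitSqSum, dif_neg (by omega)]
    push_cast
    omega
  | succ k ih =>
    intro n s hn
    by_cases h : n > 0
    · rw [digitSqSum, dif_pos h]
      rw [PySem.Int.floordiv_eq_ediv_of_pos (by omega), PySem.Int.mod_eq_emod_of_pos (by omega)]
      have h10 : (10:Int) ^ (k+1) = 10 * 10 ^ k := by ring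
      have hdiv : n / 10 < 10 ^ k := by omega
      have := ih (n / 10) (s + (n % 10) ^ 2) hdiv
      have hm : 0 ≤ n % 10 ∧ n % 10 < 10 := ⟨Int.emod_nonneg n (by norm_num), Int.emod_lt_of_pos n (by norm_num)⟩
      have hsq : (n % 10) ^ 2 ≤ 81 := by nlinarith [hm.1, hm.2]
      push_cast at *
      linarith
    · rw [digitSqSum, dif_neg h]
      push_cast
      omega

-- iterate of one transformation step (proof-side description of the orbit)
def Fiter : Nat → Int → Int
  | 0, v => v
  | j + 1, v => Fiter j (digitSqSum v 0)

lemma digitSqSum_one : digitSqSum 1 0 = 1 := by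
  rw [digitSqSum, dif_pos (by norm_num), PySem.Int.floordiv_eq_ediv_of_pos (by norm_num),
    PySem.Int.mod_eq_emod_of_pos (by norm_num)]
  norm_num
  rw [digitSqSum, dif_neg (by norm_num)]

-- main invariant: membership in bGood k = reaching 1 within k steps, for states in 0..810
lemma mem_bGood (k : Nat) : ∀ v : Int, 0 ≤ v → v ≤ 810 →
    ((bGood k).contains v = true ↔ ∃ j ≤ k, Fiter j v = 1) := by
  induction k with
  | zero =>
    intro v _ _
    simp only [bGood]
    rw [List.contains_eq_mem, decide_eq_true_eq, List.mem_singleton]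
    constructor
    · intro h; exact ⟨0, le_refl 0, h⟩
    · rintro ⟨j, hj, h⟩
      interval_cases j
      exact h
  | succ k ih =>
    intro v hv0 hv1
    have hf0 : 0 ≤ digitSqSum v 0 := digitSqSum_nonneg v 0 le_rfl
    have hf1 : digitSqSum v 0 ≤ 810 := by
      have := digitSqSum_le 3 v 0 (by omega)
      omega
    simp only [bGood]
    rw [List.contains_eq_mem, decide_eq_true_eq, List.mem_filter,
      PySem.List.mem_pyRange_one, ih (digitSqSum v 0) hf0 hf1]
    constructor
    · rintro ⟨-, j, hj, h⟩
      exact ⟨j + 1, by omega, h⟩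
    · rintro ⟨j, hj, h⟩
      refine ⟨⟨hv0, by omega⟩, ?_⟩
      match j, h with
      | 0, h =>
        exact ⟨0, by omega, by simp only [Fiter] at h ⊢; rw [h, digitSqSum_one]⟩
      | j + 1, h =>
        exact ⟨j, by omega, h⟩

lemma exists_le6 (P : Nat → Prop) :
    (∃ j ≤ 6, P j) ↔ P 0 ∨ P 1 ∨ P 2 ∨ P 3 ∨ P 4 ∨ P 5 ∨ P 6 := by
  constructor
  · rintro ⟨j, hj, h⟩
    interval_cases j <;> tauto
  · rintro (h | h | h | h | h | h | h)
    exacts [⟨0, by omega, h⟩, ⟨1, by omega, h⟩, ⟨2, by omega, h⟩, ⟨3, by omega, h⟩,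
            ⟨4, by omega, h⟩, ⟨5, by omega, h⟩, ⟨6, by omega, h⟩]

-- ===== VERDICT (by name: the statement is the Claim_ definition above) =====
theorem hf4_1_spec : Claim_equal_hf4_1 := by
  intro n hdom
  unfold Spec_hf4_1 hf4_1 hf4_1_alt
  by_cases h1 : n == 1
  · rw [if_pos h1, if_pos h1]
  · rw [if_neg h1, if_neg h1]
    simp only [foldl_hf2_3]
    have hdomn : n ≤ 2147483648 := by
      unfold Dom_hf4_1 pvDomInt at hdom
      simpa using (of_decide_eq_true hdom).2
    have hv0 : 0 ≤ digitSqSum n 0 := digitSqSum_nonneg n 0 le_rfl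
    have hv1 : digitSqSum n 0 ≤ 810 := by
      have := digitSqSum_le 10 n 0 (by omega)
      omega
    rw [Bool.eq_iff_iff]
    rw [mem_bGood 6 (digitSqSum n 0) hv0 hv1, exists_le6]
    have e0 : Fiter 0 (digitSqSum n 0) = digitSqSum n 0 := rfl
    have e1 : Fiter 1 (digitSqSum n 0) = digitSqSum (digitSqSum n 0) 0 := rfl
    have e2 : Fiter 2 (digitSqSum n 0) = digitSqSum (digitSqSum (digitSqSum n 0) 0) 0 := rfl
    have e3 : Fiter 3 (digitSqSum n 0) =
        digitSqSum (digitSqSum (digitSqSum (digitSqSum n 0) 0) 0) 0 := rfl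
    have e4 : Fiter 4 (digitSqSum n 0) =
        digitSqSum (digitSqSum (digitSqSum (digitSqSum (digitSqSum n 0) 0) 0) 0) 0 := rfl
    have e5 : Fiter 5 (digitSqSum n 0) =
        digitSqSum (digitSqSum (digitSqSum (digitSqSum (digitSqSum (digitSqSum n 0) 0) 0) 0) 0) 0 := rfl
    have e6 : Fiter 6 (digitSqSum n 0) =
        digitSqSum (digitSqSum (digitSqSum (digitSqSum (digitSqSum (digitSqSum (digitSqSum n 0) 0) 0) 0) 0) 0) 0 := rfl
    rw [e0, e1, e2, e3, e4, e5, e6]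
    split_ifs <;> simp_all
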